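-- pv_equiv track=rewrite | github.com/HotelAiOS/agent-zero-v1 | enhanced-cli-commands.py | _get_tech_recommendations
-- ===== SOURCE A (Python) =====
-- def _get_tech_recommendations(tech_stack: tuple) -> dict:
--     """Get recommendations based on technology stack"""
--
--     recommendations = {
--         "Typical Task Patterns": [],
--         "Common Dependencies": [],
--         "Recommended Agents": [],
--         "Best Practices": []
--     }
--
--     stack_lower = [tech.lower() for tech in tech_stack]
--
--     if "fastapi" in stack_lower:
--         recommendations["Typical Task Patterns"].extend([
--             "API endpoint design and implementation",
--             "Pydantic model definition",
--             "Dependency injection setup",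
--             "OpenAPI documentation"
--         ])
--         recommendations["Recommended Agents"].append("backend")
--
--     if "react" in stack_lower:
--         recommendations["Typical Task Patterns"].extend([
--             "Component architecture planning",
--             "State management setup",
--             "API integration layer",
--             "UI/UX implementation"
--         ])
--         recommendations["Recommended Agents"].append("frontend")
--
--     if "postgresql" in stack_lower or "neo4j" in stack_lower:
--         recommendations["Typical Task Patterns"].extend([
--             "Database schema design",
--             "Migration scripts",
--             "Query optimization",
--             "Data modeling"
--         ])
--         recommendations["Recommended Agents"].append("database")
--
--     if "docker" in stack_lower:
--         recommendations["Typical Task Patterns"].extend([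
--             "Container configuration",
--             "Multi-service orchestration",
--             "Network setup",
--             "Volume management"
--         ])
--         recommendations["Recommended Agents"].append("devops")
--
--     # Common best practices
--     recommendations["Best Practices"] = [
--         "Start with architecture and design tasks",
--         "Define clear interfaces between components",
--         "Plan testing strategy early",
--         "Consider deployment requirements from the start"
--     ]
--
--     return recommendations
-- ===== SOURCE B (Python) =====
-- _BEST_PRACTICES = [
--     "Start with architecture and design tasks",
--     "Define clear interfaces between components",
--     "Plan testing strategy early",
--     "Consider deployment requirements from the start",
-- ]
--
-- # category index per trigger tech
-- _CAT = {"fastapi": 0, "react": 1, "postgresql": 2, "neo4j": 2, "docker": 3}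
--
-- _PATTERNS = [
--     ["API endpoint design and implementation",
--      "Pydantic model definition",
--      "Dependency injection setup",
--      "OpenAPI documentation"],
--     ["Component architecture planning",
--      "State management setup",
--      "API integration layer",
--      "UI/UX implementation"],
--     ["Database schema design",
--      "Migration scripts",
--      "Query optimization",
--      "Data modeling"],
--     ["Container configuration",
--      "Multi-service orchestration",
--      "Network setup",
--      "Volume management"],
-- ]
--
-- _AGENTS = ["backend", "frontend", "database", "devops"]
--
--
-- def _get_tech_recommendations(tech_stack: tuple) -> dict:
--     """Get recommendations based on technology stack (input-driven, single pass)."""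
--     hit = [False, False, False, False]
--     for tech in tech_stack:
--         i = _CAT.get(tech.lower())
--         if i is not None:
--             hit[i] = True
--     patterns = []
--     agents = []
--     for i in range(4):
--         if hit[i]:
--             patterns += _PATTERNS[i]
--             agents.append(_AGENTS[i])
--     return {
--         "Typical Task Patterns": patterns,
--         "Common Dependencies": [],
--         "Recommended Agents": agents,
--         "Best Practices": list(_BEST_PRACTICES),
--     }
-- ===== Notes on version B (the rewrite author's own statement) =====
-- stated objective: alternative
-- what changed: Inverts the traversal: instead of four rule-by-rule membership scans of the lowered stack mutating a pre-built dict, B indexes the rules by trigger tech (dict tech->category), makes one pass over the stack marking a 4-slot hit array, then assembles the dict from the flags.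
import Mathlib
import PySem

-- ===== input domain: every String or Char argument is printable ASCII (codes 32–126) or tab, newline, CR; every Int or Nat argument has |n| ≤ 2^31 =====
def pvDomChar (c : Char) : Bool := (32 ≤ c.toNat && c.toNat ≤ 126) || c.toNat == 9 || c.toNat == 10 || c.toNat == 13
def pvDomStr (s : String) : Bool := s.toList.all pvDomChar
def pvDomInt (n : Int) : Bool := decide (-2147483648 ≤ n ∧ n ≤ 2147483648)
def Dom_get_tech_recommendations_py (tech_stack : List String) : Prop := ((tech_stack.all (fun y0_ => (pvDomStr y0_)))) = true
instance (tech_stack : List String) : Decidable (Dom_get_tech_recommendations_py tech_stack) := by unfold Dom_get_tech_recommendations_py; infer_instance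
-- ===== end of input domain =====

-- B inverts A's traversal: instead of four rule-by-rule membership scans of the lowered stack
-- mutating a pre-built dict, it indexes rules by trigger tech and makes one pass over the stack
-- marking a 4-slot hit array, then assembles the dict from the flags (objective: alternative).

-- ===== PORT A =====
def get_tech_recommendations_py (tech_stack : List String) : List (String × List String) :=
  let recommendations : PySem.Dict String (List String) := PySem.Dict.ofList
    [("Typical Task Patterns", []), ("Common Dependencies", []),
     ("Recommended Agents", []), ("Best Practices", [])]
  let stack_lower := tech_stack.map PySem.Str.lower
  let recommendations :=
    if stack_lower.contains "fastapi" then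
      ((recommendations.modify "Typical Task Patterns" []
          (· ++ ["API endpoint design and implementation", "Pydantic model definition",
                 "Dependency injection setup", "OpenAPI documentation"])).modify
        "Recommended Agents" [] (· ++ ["backend"]))
    else recommendations
  let recommendations :=
    if stack_lower.contains "react" then
      ((recommendations.modify "Typical Task Patterns" []
          (· ++ ["Component architecture planning", "State management setup",
                 "API integration layer", "UI/UX implementation"])).modify
        "Recommended Agents" [] (· ++ ["frontend"]))
    else recommendations
  let recommendations :=
    if stack_lower.contains "postgresql" || stack_lower.contains "neo4j" then
      ((recommendations.modify "Typical Task Patterns" []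
          (· ++ ["Database schema design", "Migration scripts",
                 "Query optimization", "Data modeling"])).modify
        "Recommended Agents" [] (· ++ ["database"]))
    else recommendations
  let recommendations :=
    if stack_lower.contains "docker" then
      ((recommendations.modify "Typical Task Patterns" []
          (· ++ ["Container configuration", "Multi-service orchestration",
                 "Network setup", "Volume management"])).modify
        "Recommended Agents" [] (· ++ ["devops"]))
    else recommendations
  let recommendations := recommendations.insert "Best Practices"
    ["Start with architecture and design tasks", "Define clear interfaces between components",
     "Plan testing strategy early", "Consider deployment requirements from the start"]
  recommendations.items

-- ===== PORT B =====
def pvBestPractices : List String :=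
  ["Start with architecture and design tasks", "Define clear interfaces between components",
   "Plan testing strategy early", "Consider deployment requirements from the start"]

-- category index per trigger tech (Python _CAT)
def pvCat : PySem.Dict String Nat := PySem.Dict.ofList
  [("fastapi", 0), ("react", 1), ("postgresql", 2), ("neo4j", 2), ("docker", 3)]

def pvPatterns : List (List String) :=
  [["API endpoint design and implementation", "Pydantic model definition",
    "Dependency injection setup", "OpenAPI documentation"],
   ["Component architecture planning", "State management setup",
    "API integration layer", "UI/UX implementation"],
   ["Database schema design", "Migration scripts",
    "Query optimization", "Data modeling"],
   ["Container configuration", "Multi-service orchestration",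
    "Network setup", "Volume management"]]

def pvAgents : List String := ["backend", "frontend", "database", "devops"]

def get_tech_recommendations_py_alt (tech_stack : List String) : List (String × List String) :=
  -- single pass over the stack marking hit flags via the category index
  let hit := tech_stack.foldl
    (fun (hit : List Bool) tech =>
      match pvCat.get? (PySem.Str.lower tech) with
      | some i => hit.set i true
      | none => hit)
    [false, false, false, false]
  -- assemble from the flags, in category order
  let pa := (PySem.List.pyRange 0 4 1).foldl
    (fun (acc : List String × List String) i =>
      if PySem.List.pyGetD hit i false then
        (acc.1 ++ PySem.List.pyGetD pvPatterns i [],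
         acc.2 ++ [PySem.List.pyGetD pvAgents i ""])
      else acc)
    ([], [])
  [("Typical Task Patterns", pa.1), ("Common Dependencies", []),
   ("Recommended Agents", pa.2), ("Best Practices", pvBestPractices)]

-- ===== PRECONDITION & SPEC =====
def Spec_get_tech_recommendations_py (tech_stack : List String) (out : List (String × List String)) : Prop := out = get_tech_recommendations_py_alt tech_stack
instance (tech_stack : List String) (out : List (String × List String)) : Decidable (Spec_get_tech_recommendations_py tech_stack out) := by unfold Spec_get_tech_recommendations_py; infer_instance

-- ===== CLAIM (what is proved, stated in full; the proofs are below) =====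
def Claim_equal_get_tech_recommendations_py : Prop := ∀ (tech_stack : List String), Dom_get_tech_recommendations_py tech_stack → Spec_get_tech_recommendations_py tech_stack (get_tech_recommendations_py tech_stack)

-- ===== LEMMAS AND PROOFS =====
-- The hit array after the fold is exactly the four membership flags of A.
lemma hit_fold_eq (ts : List String) (a b c d : Bool) :
    ts.foldl
      (fun (hit : List Bool) tech =>
        match pvCat.get? (PySem.Str.lower tech) with
        | some i => hit.set i true
        | none => hit)
      [a, b, c, d]
    = [a || (ts.map PySem.Str.lower).contains "fastapi",
       b || (ts.map PySem.Str.lower).contains "react",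
       c || ((ts.map PySem.Str.lower).contains "postgresql"
             || (ts.map PySem.Str.lower).contains "neo4j"),
       d || (ts.map PySem.Str.lower).contains "docker"] := by
  have hc : pvCat = PySem.Dict.mk
      [("fastapi", 0), ("react", 1), ("postgresql", 2), ("neo4j", 2), ("docker", 3)] := by decide
  induction ts generalizing a b c d with
  | nil => simp
  | cons t ts ih =>
    simp only [List.foldl_cons, List.map_cons, List.contains_cons]
    by_cases h1 : PySem.Str.lower t = "fastapi"
    · have hg : pvCat.get? (PySem.Str.lower t) = some 0 := by
        simp [hc, PySem.Dict.get?_mk_cons, h1]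
      simp only [hg, List.set]
      rw [ih]
      simp [h1]
    · by_cases h2 : PySem.Str.lower t = "react"
      · have hg : pvCat.get? (PySem.Str.lower t) = some 1 := by
          simp [hc, PySem.Dict.get?_mk_cons, h2]
        simp only [hg, List.set]
        rw [ih]
        simp [h2]
      · by_cases h3 : PySem.Str.lower t = "postgresql"
        · have hg : pvCat.get? (PySem.Str.lower t) = some 2 := by
            simp [hc, PySem.Dict.get?_mk_cons, h3]
          simp only [hg, List.set]
          rw [ih]
          simp [h3]
        · by_cases h4 : PySem.Str.lower t = "neo4j"
          · have hg : pvCat.get? (PySem.Str.lower t) = some 2 := by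
              simp [hc, PySem.Dict.get?_mk_cons, h4]
            simp only [hg, List.set]
            rw [ih]
            simp [h4]
          · by_cases h5 : PySem.Str.lower t = "docker"
            · have hg : pvCat.get? (PySem.Str.lower t) = some 3 := by
                simp [hc, PySem.Dict.get?_mk_cons, h5]
              simp only [hg, List.set]
              rw [ih]
              simp [h5]
            · have hg : pvCat.get? (PySem.Str.lower t) = none := by
                simp [hc, PySem.Dict.get?,
                      Ne.symm h1, Ne.symm h2, Ne.symm h3, Ne.symm h4, Ne.symm h5]
              simp only [hg]
              rw [ih]
              have e1 : ("fastapi" == PySem.Str.lower t) = false :=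
                beq_eq_false_iff_ne.mpr (Ne.symm h1)
              have e2 : ("react" == PySem.Str.lower t) = false :=
                beq_eq_false_iff_ne.mpr (Ne.symm h2)
              have e3 : ("postgresql" == PySem.Str.lower t) = false :=
                beq_eq_false_iff_ne.mpr (Ne.symm h3)
              have e4 : ("neo4j" == PySem.Str.lower t) = false :=
                beq_eq_false_iff_ne.mpr (Ne.symm h4)
              have e5 : ("docker" == PySem.Str.lower t) = false :=
                beq_eq_false_iff_ne.mpr (Ne.symm h5)
              simp [e1, e2, e3, e4, e5]

-- ===== VERDICT (by name: the statement is the Claim_ definition above) =====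
theorem get_tech_recommendations_py_spec : Claim_equal_get_tech_recommendations_py := by
  intro ts _
  unfold Spec_get_tech_recommendations_py get_tech_recommendations_py get_tech_recommendations_py_alt
  rw [hit_fold_eq]
  simp only [Bool.false_or]
  cases hf : (ts.map PySem.Str.lower).contains "fastapi" <;>
  cases hr : (ts.map PySem.Str.lower).contains "react" <;>
  cases hp : (ts.map PySem.Str.lower).contains "postgresql" <;>
  cases hn : (ts.map PySem.Str.lower).contains "neo4j" <;>
  cases hd : (ts.map PySem.Str.lower).contains "docker" <;> rfl
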